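-- pv_equiv track=rewrite | github.com/chaseU2/ancombc2-heatmaps | ancombc2_heatmaps/plotter.py | make_unique_labels
-- ===== SOURCE A (Python) =====
-- from typing import Callable, Dict, List, Optional, Sequence, Tuple, Union
--
-- def make_unique_labels(labels: Sequence[str]) -> List[str]:
--     counts = {}
--     out = []
--     for lab in labels:
--         if lab not in counts:
--             counts[lab] = 1
--             out.append(lab)
--         else:
--             counts[lab] += 1
--             out.append(f"{lab} ({counts[lab]})")
--     return out
-- ===== SOURCE B (Python) =====
-- def make_unique_labels(labels):
--     labels = list(labels)
--     positions = {}
--     for i, lab in enumerate(labels):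
--         positions.setdefault(lab, []).append(i)
--     out = [""] * len(labels)
--     for lab, idxs in positions.items():
--         for k, i in enumerate(idxs):
--             out[i] = lab if k == 0 else f"{lab} ({k + 1})"
--     return out
-- ===== Notes on version B (the rewrite author's own statement) =====
-- stated objective: alternative
-- what changed: Instead of a single pass that maintains a dict of running counts, B first groups the ordered positions of each label into a dict label -> index list, pre-allocates the output, and then scatters: the bare label goes to the first position of its group and 'lab (k+1)' to the k-th subsequent position.
import Mathlib
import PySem

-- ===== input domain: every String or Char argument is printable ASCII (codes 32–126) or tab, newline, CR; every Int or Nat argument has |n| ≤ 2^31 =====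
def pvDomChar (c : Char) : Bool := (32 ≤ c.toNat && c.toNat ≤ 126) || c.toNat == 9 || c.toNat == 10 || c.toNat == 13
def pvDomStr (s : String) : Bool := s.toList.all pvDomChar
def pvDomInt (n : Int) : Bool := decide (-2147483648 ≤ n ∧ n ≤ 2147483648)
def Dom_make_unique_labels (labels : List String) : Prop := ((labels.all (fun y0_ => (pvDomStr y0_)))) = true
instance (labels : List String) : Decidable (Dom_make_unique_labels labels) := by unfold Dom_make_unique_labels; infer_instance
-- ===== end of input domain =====

-- B replaces A's single pass with a dict of running counts by a group-then-scatter scheme: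
-- a dict label -> ordered position list, then the suffixed labels are written into a
-- pre-allocated output (alternative decomposition, same return value).

-- ===== PORT A =====
-- one loop iteration of A: the dict of counts and the output list so far
def muStepA (st : PySem.Dict String Int × List String) (lab : String) :
    PySem.Dict String Int × List String :=
  match st.1.get? lab with
  | none => (st.1.insert lab 1, st.2 ++ [lab])
  | some c =>
      (st.1.insert lab (c + 1),
       st.2 ++ [lab ++ " (" ++ PySem.Int.toStr (c + 1) ++ ")"])

def make_unique_labels (labels : List String) : List String :=
  (labels.foldl muStepA (PySem.Dict.empty, [])).2

-- ===== PORT B =====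
-- positions.setdefault(lab, []).append(i)  — Dict.modify is exact for this
def muGroupStep (d : PySem.Dict String (List Int)) (p : Int × String) :
    PySem.Dict String (List Int) :=
  d.modify p.2 [] (fun l => l ++ [p.1])

-- out[i] = lab if k == 0 else f"{lab} ({k + 1})"  for r = (k, i)
def muPlace (lab : String) (out : List String) (r : Int × Int) : List String :=
  PySem.List.pySetD out r.2
    (if r.1 = 0 then lab else lab ++ " (" ++ PySem.Int.toStr (r.1 + 1) ++ ")")

def make_unique_labels_alt (labels : List String) : List String :=
  let positions := (PySem.List.enumerate labels).foldl muGroupStep PySem.Dict.empty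
  let out0 := List.replicate labels.length ""
  positions.items.foldl
    (fun out q => (PySem.List.enumerate q.2).foldl (muPlace q.1) out) out0

-- ===== PRECONDITION & SPEC =====
def Spec_make_unique_labels (labels : List String) (out : List String) : Prop := out = make_unique_labels_alt labels
instance (labels : List String) (out : List String) : Decidable (Spec_make_unique_labels labels out) := by unfold Spec_make_unique_labels; infer_instance

-- ===== CLAIM (what is proved, stated in full; the proofs are below) =====
def Claim_equal_make_unique_labels : Prop := ∀ (labels : List String), Dom_make_unique_labels labels → Spec_make_unique_labels labels (make_unique_labels labels)

-- ===== LEMMAS AND PROOFS =====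

-- the label emitted for an element preceded by the prefix `pre`
def muEmit (pre : List String) (lab : String) : String :=
  if pre.count lab = 0 then lab
  else lab ++ " (" ++ PySem.Int.toStr ((pre.count lab : Int) + 1) ++ ")"

-- reference result: process `rest` after having seen `pre`
def muBuild (pre rest : List String) : List String :=
  match rest with
  | [] => []
  | x :: rs => muEmit pre x :: muBuild (pre ++ [x]) rs

-- ---- A equals muBuild ----

-- A's dict invariant: counts record exactly the multiplicities of the processed prefix
def muInv (d : PySem.Dict String Int) (pre : List String) : Prop :=
  ∀ lab, d.get? lab = if pre.count lab = 0 then none else some ((pre.count lab : Int))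

lemma muInv_step (d : PySem.Dict String Int) (pre : List String) (lab : String)
    (h : muInv d pre) :
    muInv (d.insert lab ((pre.count lab : Int) + 1)) (pre ++ [lab]) := by
  intro x
  by_cases hx : x = lab
  · subst hx
    simp [PySem.Dict.get?_insert_self, List.count_append]
  · have hlx : ¬ lab = x := fun hh => hx hh.symm
    rw [PySem.Dict.get?_insert_of_ne _ _ hx]
    simpa [List.count_append, List.count_singleton, hlx] using h x

lemma muLoopA (rest : List String) : ∀ (pre out : List String) (d : PySem.Dict String Int),
    muInv d pre →
    (rest.foldl muStepA (d, out)).2 = out ++ muBuild pre rest := by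
  induction rest with
  | nil => intro pre out d _; simp [muBuild]
  | cons x rs ih =>
    intro pre out d hinv
    have hx := hinv x
    by_cases hc : pre.count x = 0
    · have hstep : muStepA (d, out) x = (d.insert x 1, out ++ [x]) := by
        simp [muStepA, hx, hc]
      have hinv' : muInv (d.insert x ((pre.count x : Int) + 1)) (pre ++ [x]) :=
        muInv_step d pre x hinv
      rw [List.foldl_cons, hstep]
      have h1 : (1 : Int) = (pre.count x : Int) + 1 := by simp [hc]
      rw [h1]
      rw [ih (pre ++ [x]) (out ++ [x]) _ hinv']
      simp [muBuild, muEmit, hc]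
    · have hstep : muStepA (d, out) x =
          (d.insert x ((pre.count x : Int) + 1),
           out ++ [x ++ " (" ++ PySem.Int.toStr ((pre.count x : Int) + 1) ++ ")"]) := by
        simp [muStepA, hx, hc]
      rw [List.foldl_cons, hstep,
          ih (pre ++ [x]) _ _ (muInv_step d pre x hinv)]
      simp [muBuild, muEmit, hc]

lemma muA_eq (labels : List String) : make_unique_labels labels = muBuild [] labels := by
  have h := muLoopA labels [] [] PySem.Dict.empty (by
    intro lab; simp [PySem.Dict.get?_empty])
  simpa [make_unique_labels] using h

-- ---- pointwise characterisation of muBuild ----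

lemma muBuild_length (rest : List String) : ∀ pre, (muBuild pre rest).length = rest.length := by
  induction rest with
  | nil => intro pre; simp [muBuild]
  | cons x rs ih => intro pre; simp [muBuild, ih]

lemma muBuild_getElem (rest : List String) :
    ∀ (pre : List String) (j : Nat) (hj : j < rest.length),
    (muBuild pre rest)[j]? = some (muEmit (pre ++ rest.take j) rest[j]) := by
  induction rest with
  | nil => intro pre j hj; simp at hj
  | cons x rs ih =>
    intro pre j hj
    cases j with
    | zero => simp [muBuild]
    | succ j =>
      have hj' : j < rs.length := by simpa using hj
      have := ih (pre ++ [x]) j hj'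
      simpa [muBuild, List.append_assoc] using this

-- ---- the position list of a label ----

def muPos (labels : List String) (s : Int) (lab : String) : List Int :=
  match labels with
  | [] => []
  | x :: xs => if x = lab then s :: muPos xs (s + 1) lab else muPos xs (s + 1) lab

lemma muPos_eq_filter (labels : List String) : ∀ (s : Int) (lab : String),
    (((PySem.List.enumerate labels s).map Prod.swap).filter
        (fun p => p.1 == lab)).map (·.2) = muPos labels s lab := by
  induction labels with
  | nil => intro s lab; simp [PySem.List.enumerate_nil, muPos]
  | cons x xs ih =>
    intro s lab
    rw [PySem.List.enumerate_cons]
    by_cases hx : x = lab <;>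
      simp [muPos, hx, ih (s + 1) lab]

lemma muPos_mem_iff (labels : List String) (s j : Int) (lab : String) :
    j ∈ muPos labels s lab ↔
      ∃ k : Nat, ∃ h : k < labels.length, labels[k] = lab ∧ j = s + k := by
  rw [← muPos_eq_filter]
  simp only [List.mem_map, List.mem_filter, PySem.List.mem_enumerate_iff]
  constructor
  · rintro ⟨p, ⟨⟨a, ⟨k, hk, rfl⟩, rfl⟩, hlab⟩, rfl⟩
    exact ⟨k, hk, by simpa using hlab, by simp⟩
  · rintro ⟨k, hk, hlab, rfl⟩
    exact ⟨(labels[k], s + k), ⟨⟨(s + k, labels[k]), ⟨k, hk, rfl⟩, rfl⟩, by simpa using hlab⟩, rfl⟩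

lemma muPos_mem_lb (labels : List String) : ∀ (s j : Int) (lab : String),
    j ∈ muPos labels s lab → s ≤ j := by
  intro s j lab h
  rcases (muPos_mem_iff labels s j lab).1 h with ⟨k, _, _, rfl⟩
  omega

lemma muPos_nodup (labels : List String) : ∀ (s : Int) (lab : String),
    (muPos labels s lab).Nodup := by
  induction labels with
  | nil => intro s lab; simp [muPos]
  | cons x xs ih =>
    intro s lab
    by_cases hx : x = lab
    · simp only [muPos, if_pos hx, List.nodup_cons]
      refine ⟨fun hmem => ?_, ih (s + 1) lab⟩
      have := muPos_mem_lb xs (s + 1) s lab hmem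
      omega
    · simpa [muPos, hx] using ih (s + 1) lab

lemma muPos_rank (labels : List String) :
    ∀ (s : Int) (j : Nat) (hj : j < labels.length) (lab : String), labels[j] = lab →
    (muPos labels s lab)[(labels.take j).count lab]? = some (s + j) := by
  induction labels with
  | nil => intro s j hj; simp at hj
  | cons x xs ih =>
    intro s j hj lab hlab
    cases j with
    | zero =>
      have hx : x = lab := by simpa using hlab
      simp [muPos, hx]
    | succ j =>
      have hj' : j < xs.length := by simpa using hj
      have hlab' : xs[j] = lab := by simpa using hlab
      have hrec := ih (s + 1) j hj' lab hlab'
      by_cases hx : x = lab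
      · have : (s + 1 : Int) + j = s + (j + 1) := by ring
        simpa [muPos, hx, List.count_cons, this] using hrec
      · have : (s + 1 : Int) + j = s + (j + 1) := by ring
        simpa [muPos, hx, List.count_cons, this] using hrec

-- ---- scatter over one group ----

lemma length_foldl_place (idxs : List Int) (lab : String) :
    ∀ (s : Int) (out : List String),
    ((PySem.List.enumerate idxs s).foldl (muPlace lab) out).length = out.length := by
  induction idxs with
  | nil => intro s out; simp [PySem.List.enumerate_nil]
  | cons i rest ih =>
    intro s out
    rw [PySem.List.enumerate_cons, List.foldl_cons, ih]
    simp [muPlace, PySem.List.length_pySetD]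

lemma place_getElem?_notmem (idxs : List Int) (lab : String) (j : Nat) :
    ∀ (s : Int) (out : List String), (j : Int) ∉ idxs → (∀ i ∈ idxs, 0 ≤ i) →
    ((PySem.List.enumerate idxs s).foldl (muPlace lab) out)[j]? = out[j]? := by
  induction idxs with
  | nil => intro s out _ _; simp [PySem.List.enumerate_nil]
  | cons i rest ih =>
    intro s out hj hnn
    have hji : (j : Int) ≠ i := fun h => hj (h ▸ List.mem_cons_self)
    have hi0 : 0 ≤ i := hnn i List.mem_cons_self
    rw [PySem.List.enumerate_cons, List.foldl_cons,
        ih (s + 1) _ (fun h => hj (List.mem_cons_of_mem _ h))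
          (fun i' hi' => hnn i' (List.mem_cons_of_mem _ hi'))]
    have htn : i.toNat ≠ j := by omega
    simp [muPlace, PySem.List.pySetD_of_nonneg _ _ hi0, List.getElem?_set_ne htn]

lemma place_getElem?_mem (idxs : List Int) (lab : String) (j : Nat) :
    ∀ (s : Int) (out : List String) (k : Nat) (hk : k < idxs.length),
    idxs[k] = (j : Int) → idxs.Nodup → (∀ i ∈ idxs, 0 ≤ i) → j < out.length →
    ((PySem.List.enumerate idxs s).foldl (muPlace lab) out)[j]? =
      some (if (s + k : Int) = 0 then lab
            else lab ++ " (" ++ PySem.Int.toStr (s + k + 1) ++ ")") := by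
  induction idxs with
  | nil => intro s out k hk; simp at hk
  | cons i rest ih =>
    intro s out k hk hik hnd hnn hlen
    rw [PySem.List.enumerate_cons, List.foldl_cons]
    cases k with
    | zero =>
      have hij : i = (j : Int) := by simpa using hik
      have hjrest : (j : Int) ∉ rest := by
        rw [← hij]; exact (List.nodup_cons.1 hnd).1
      rw [place_getElem?_notmem rest lab j (s + 1) _ hjrest
            (fun i' hi' => hnn i' (List.mem_cons_of_mem _ hi'))]
      have : (muPlace lab out (s, i))[j]? = some
          (if s = 0 then lab else lab ++ " (" ++ PySem.Int.toStr (s + 1) ++ ")") := by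
        simp [muPlace, hij, List.getElem?_set_self hlen]
      simpa using this
    | succ k =>
      have hk' : k < rest.length := by simpa using hk
      have hik' : rest[k] = (j : Int) := by simpa using hik
      have hjrest : (j : Int) ∈ rest := by rw [← hik']; exact List.getElem_mem hk'
      have hij : i ≠ (j : Int) := fun h => (List.nodup_cons.1 hnd).1 (h ▸ hjrest)
      have hlen' : j < (muPlace lab out (s, i)).length := by
        simpa [muPlace, PySem.List.length_pySetD] using hlen
      have hrec := ih (s + 1) (muPlace lab out (s, i)) k hk' hik'
        (List.nodup_cons.1 hnd).2
        (fun i' hi' => hnn i' (List.mem_cons_of_mem _ hi')) hlen'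
      rw [hrec]
      have harith : (s + 1 : Int) + k = s + (k + 1 : Nat) := by push_cast; ring
      rw [harith]

-- ---- the grouping dict ----

lemma muGroup_getD (labels : List String) (lab : String) :
    ((PySem.List.enumerate labels).foldl muGroupStep PySem.Dict.empty).getD lab []
      = muPos labels 0 lab := by
  have hfold : (PySem.List.enumerate labels).foldl muGroupStep PySem.Dict.empty
      = ((PySem.List.enumerate labels).map Prod.swap).foldl
          (fun d p => d.modify p.1 [] (fun l => l ++ [p.2])) PySem.Dict.empty := by
    rw [List.foldl_map]
    rfl
  rw [hfold, PySem.Dict.getD_foldl_modify_append, ← muPos_eq_filter labels 0 lab]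
  simp [PySem.Dict.getD_empty]

lemma muGroup_nodup_keys (labels : List String) :
    ((PySem.List.enumerate labels).foldl muGroupStep PySem.Dict.empty).keys.Nodup := by
  have : (PySem.List.enumerate labels).foldl muGroupStep PySem.Dict.empty
      = (PySem.List.enumerate labels).foldl
          (fun d x => d.modify (Prod.snd x) [] ((fun _ x l => l ++ [x.1]) d x))
          PySem.Dict.empty := rfl
  rw [this]
  exact PySem.Dict.nodup_keys_foldl_modify_key _ _ _ _ _ PySem.Dict.nodup_keys_empty

lemma muGroup_get? (labels : List String) (lab : String) (h : lab ∈ labels) :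
    ((PySem.List.enumerate labels).foldl muGroupStep PySem.Dict.empty).get? lab
      = some (muPos labels 0 lab) := by
  have hD := muGroup_getD labels lab
  rw [PySem.Dict.getD_eq_get?_getD] at hD
  rcases hne : ((PySem.List.enumerate labels).foldl muGroupStep PySem.Dict.empty).get? lab with
    _ | v
  · exfalso
    rw [hne] at hD
    rcases List.mem_iff_getElem.1 h with ⟨k, hk, hlab⟩
    have := muPos_rank labels 0 k hk lab hlab
    rw [← hD] at this
    simp at this
  · rw [hne] at hD
    simp [hD.symm]

-- ---- B equals muBuild ----

lemma length_outer (qs : List (String × List Int)) :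
    ∀ (out : List String),
    (qs.foldl (fun out q => (PySem.List.enumerate q.2).foldl (muPlace q.1) out) out).length
      = out.length := by
  induction qs with
  | nil => intro out; rfl
  | cons q rest ih =>
    intro out
    rw [List.foldl_cons, ih, length_foldl_place]

lemma outer_notkey (qs : List (String × List Int)) (j : Nat) :
    ∀ (out : List String),
    (∀ q ∈ qs, (j : Int) ∉ q.2) → (∀ q ∈ qs, ∀ i ∈ q.2, 0 ≤ i) →
    (qs.foldl (fun out q => (PySem.List.enumerate q.2).foldl (muPlace q.1) out) out)[j]?
      = out[j]? := by
  induction qs with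
  | nil => intro out _ _; rfl
  | cons q rest ih =>
    intro out hnm hnn
    rw [List.foldl_cons,
        ih _ (fun q' hq' => hnm q' (List.mem_cons_of_mem _ hq'))
          (fun q' hq' => hnn q' (List.mem_cons_of_mem _ hq')),
        place_getElem?_notmem q.2 q.1 j 0 out (hnm q List.mem_cons_self)
          (hnn q List.mem_cons_self)]

lemma muB_eq (labels : List String) : make_unique_labels_alt labels = muBuild [] labels := by
  have hkeys := muGroup_nodup_keys labels
  have hgroup : ∀ q ∈ ((PySem.List.enumerate labels).foldl muGroupStep PySem.Dict.empty).items,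
      q.2 = muPos labels 0 q.1 := by
    intro q hq
    have h1 := PySem.Dict.get?_of_mem_items _ (show (q.1, q.2) ∈ _ from hq) hkeys
    have h2 := muGroup_getD labels q.1
    rw [PySem.Dict.getD_eq_get?_getD, h1] at h2
    simpa using h2
  have hnn : ∀ q ∈ ((PySem.List.enumerate labels).foldl muGroupStep PySem.Dict.empty).items,
      ∀ i ∈ q.2, (0 : Int) ≤ i := by
    intro q hq i hi
    rw [hgroup q hq] at hi
    rcases (muPos_mem_iff labels 0 i q.1).1 hi with ⟨k, _, _, rfl⟩
    omega
  have hlen : (make_unique_labels_alt labels).length = labels.length := by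
    simp only [make_unique_labels_alt]
    rw [length_outer]
    simp
  apply List.ext_getElem?
  intro j
  by_cases hj : j < labels.length
  · have hjlab : labels[j] ∈ labels := List.getElem_mem hj
    have hmem : (labels[j], muPos labels 0 labels[j])
        ∈ ((PySem.List.enumerate labels).foldl muGroupStep PySem.Dict.empty).items :=
      PySem.Dict.mem_items_of_get?_eq_some _ (muGroup_get? labels labels[j] hjlab)
    rcases List.append_of_mem hmem with ⟨as, bs, hsplit⟩
    have hkeys' : (((PySem.List.enumerate labels).foldl muGroupStep
        PySem.Dict.empty).items.map (·.1)).Nodup := by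
      simpa [PySem.Dict.keys] using hkeys
    rw [hsplit, List.map_append, List.map_cons] at hkeys'
    rcases List.nodup_append.1 hkeys' with ⟨-, hnd2, hdisj⟩
    have hnotas : labels[j] ∉ as.map (·.1) := fun h => hdisj _ h _ List.mem_cons_self rfl
    have hnotbs : labels[j] ∉ bs.map (·.1) := (List.nodup_cons.1 hnd2).1
    -- members of the split are members of items
    have hin : ∀ q, q ∈ as ∨ q ∈ bs →
        q ∈ ((PySem.List.enumerate labels).foldl muGroupStep PySem.Dict.empty).items := by
      intro q hq
      rw [hsplit]
      rcases hq with h | h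
      · exact List.mem_append_left _ h
      · exact List.mem_append_right _ (List.mem_cons_of_mem _ h)
    -- a group with key ≠ labels[j] never writes position j
    have hnotj : ∀ q, q ∈ as ∨ q ∈ bs → (j : Int) ∉ q.2 := by
      intro q hq hjq
      have hq' := hin q hq
      rw [hgroup q hq'] at hjq
      rcases (muPos_mem_iff labels 0 (j : Int) q.1).1 hjq with ⟨k, hk, hlabk, hkj⟩
      have hq1 : q.1 = labels[j] := by
        have hkj2 : k = j := by omega
        subst hkj2
        exact hlabk.symm
      rcases hq with h | h
      · exact hnotas (hq1 ▸ List.mem_map_of_mem h)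
      · exact hnotbs (hq1 ▸ List.mem_map_of_mem h)
    -- unfold B's fold along the split
    have hBsplit : make_unique_labels_alt labels =
        bs.foldl (fun out q => (PySem.List.enumerate q.2).foldl (muPlace q.1) out)
          ((PySem.List.enumerate (muPos labels 0 labels[j])).foldl (muPlace labels[j])
            (as.foldl (fun out q => (PySem.List.enumerate q.2).foldl (muPlace q.1) out)
              (List.replicate labels.length ""))) := by
      simp only [make_unique_labels_alt]
      rw [hsplit, List.foldl_append, List.foldl_cons]
    -- lengths
    have hlen1 : (as.foldl (fun out q => (PySem.List.enumerate q.2).foldl (muPlace q.1) out)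
        (List.replicate labels.length "")).length = labels.length := by
      rw [length_outer]; simp
    -- the rank of j within its group
    have hrank := muPos_rank labels 0 j hj labels[j] rfl
    have hrank' : ∃ hlt : (labels.take j).count labels[j] < (muPos labels 0 labels[j]).length,
        (muPos labels 0 labels[j])[(labels.take j).count labels[j]] = ((j : Int)) := by
      rcases List.getElem?_eq_some_iff.1 (by simpa using hrank) with ⟨hlt, hv⟩
      exact ⟨hlt, hv⟩
    rcases hrank' with ⟨hlt, hv⟩
    have hmid := place_getElem?_mem (muPos labels 0 labels[j]) labels[j] j 0
      (as.foldl (fun out q => (PySem.List.enumerate q.2).foldl (muPlace q.1) out)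
        (List.replicate labels.length "")) ((labels.take j).count labels[j]) hlt hv
      (muPos_nodup labels 0 labels[j])
      (fun i hi => by
        rcases (muPos_mem_iff labels 0 i labels[j]).1 hi with ⟨k, _, _, rfl⟩
        omega)
      (by omega)
    rw [hBsplit,
        outer_notkey bs j _ (fun q hq => hnotj q (Or.inr hq))
          (fun q hq => hnn q (hin q (Or.inr hq))),
        hmid, muBuild_getElem labels [] j hj]
    by_cases hc : (labels.take j).count labels[j] = 0 <;>
      simp [muEmit, hc]
  · have h1 : (make_unique_labels_alt labels)[j]? = none := by
      rw [List.getElem?_eq_none_iff, hlen]; omega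
    have h2 : (muBuild [] labels)[j]? = none := by
      rw [List.getElem?_eq_none_iff, muBuild_length]; omega
    rw [h1, h2]

-- ===== VERDICT (by name: the statement is the Claim_ definition above) =====
theorem make_unique_labels_spec : Claim_equal_make_unique_labels := by
  intro labels _
  unfold Spec_make_unique_labels
  rw [muA_eq, muB_eq]
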